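-- pv_equiv track=rewrite | github.com/navkant/ds_algo_practice | scaler/problem_solving/pair_with_given_sum.py | solve
-- ===== SOURCE A (Python) =====
-- def solve(A):
--     hash_map = dict()
--
--     for i in A:
--         if i not in hash_map:
--             hash_map[i] = 1
--         else:
--             hash_map[i] += 1
--     n = len(A)
--     count = 0
--     for i in range(n):
--         for j in range(i+1, n):
--             sum = A[i] + A[j]
--             if sum in hash_map:
--                 count += 1
--             else:
--                 continue
--     return count
-- ===== SOURCE B (Python) =====
-- def solve(A):
--     c = {}
--     for x in A:
--         c[x] = c.get(x, 0) + 1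
--     total = 0
--     rest = list(c)
--     while rest:
--         v1 = rest[0]
--         rest = rest[1:]
--         c1 = c[v1]
--         if v1 + v1 in c:
--             total += c1 * (c1 - 1) // 2
--         for v2 in rest:
--             if v1 + v2 in c:
--                 total += c1 * c[v2]
--     return total
-- ===== Notes on version B (the rewrite author's own statement) =====
-- stated objective: alternative
-- what changed: B builds a counter of the values once and counts pairs combinatorially over the distinct values (c[v1]*c[v2] for cross-value pairs, C(c[v],2) for equal-value pairs) instead of A's scan over all index pairs; cost is O(n + d^2) in the number d of distinct values rather than O(n^2) index pairs.
import Mathlib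
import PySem

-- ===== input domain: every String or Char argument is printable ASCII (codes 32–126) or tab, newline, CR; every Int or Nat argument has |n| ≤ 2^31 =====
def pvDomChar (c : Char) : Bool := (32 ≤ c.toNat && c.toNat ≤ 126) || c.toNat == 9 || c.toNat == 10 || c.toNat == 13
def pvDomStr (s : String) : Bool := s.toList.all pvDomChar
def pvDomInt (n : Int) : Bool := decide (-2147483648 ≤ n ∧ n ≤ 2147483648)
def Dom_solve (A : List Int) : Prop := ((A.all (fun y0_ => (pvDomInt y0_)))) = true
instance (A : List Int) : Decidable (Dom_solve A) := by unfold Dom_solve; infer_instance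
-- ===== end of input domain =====

-- B replaces A's scan over all index pairs by combinatorics over the counter's distinct values
-- (cross pairs contribute c[v1]*c[v2], equal-value pairs C(c[v],2)); alternative decomposition, same result.

-- ===== PORT A =====
def solve (A : List Int) : Int :=
  let hash_map : PySem.Dict Int Int :=
    A.foldl (fun h i =>
      if h.contains i = false then h.insert i 1 else h.insert i (h.getD i 0 + 1))
      PySem.Dict.empty
  let n : Int := (A.length : Int)
  (PySem.List.pyRange 0 n).foldl (fun count i =>
    (PySem.List.pyRange (i + 1) n).foldl (fun count j =>
      let sum := PySem.List.pyGetD A i 0 + PySem.List.pyGetD A j 0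
      if hash_map.contains sum then count + 1 else count) count) 0

-- ===== PORT B =====
-- the 'while rest:' loop of Source B: rest is consumed from the front
def solveAltLoop (c : PySem.Dict Int Int) : List Int → Int → Int
  | [], total => total
  | v1 :: rest, total =>
    let c1 := c.getD v1 0
    let total := if c.contains (v1 + v1) then total + PySem.Int.floordiv (c1 * (c1 - 1)) 2 else total
    let total := rest.foldl (fun t v2 => if c.contains (v1 + v2) then t + c1 * c.getD v2 0 else t) total
    solveAltLoop c rest total

def solve_alt (A : List Int) : Int :=
  let c : PySem.Dict Int Int :=
    A.foldl (fun d x => d.insert x (d.getD x 0 + 1)) PySem.Dict.empty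
  solveAltLoop c c.keys 0

-- ===== PRECONDITION & SPEC =====
def Spec_solve (A : List Int) (out : Int) : Prop := out = solve_alt A
instance (A : List Int) (out : Int) : Decidable (Spec_solve A out) := by unfold Spec_solve; infer_instance

-- ===== CLAIM (what is proved, stated in full; the proofs are below) =====
def Claim_equal_solve : Prop := ∀ (A : List Int), Dom_solve A → Spec_solve A (solve A)

-- ===== LEMMAS AND PROOFS =====

-- the unordered-pair sum Σ_{i<j} p (A i) (A j), defined structurally
def pairSum (p : Int → Int → Int) : List Int → Int
  | [] => 0
  | x :: t => (t.map (p x)).sum + pairSum p t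

-- the 0/1 indicator "x + y occurs in A"
def indf (A : List Int) (x y : Int) : Int := if (x + y) ∈ A then 1 else 0

-- B's value-group sum over a list of distinct values, with counts cnt
def groupSum (p : Int → Int → Int) (cnt : Int → Nat) : List Int → Int
  | [] => 0
  | v :: vs => ((cnt v).choose 2 : Int) * p v v
      + (vs.map (fun v2 => (cnt v : Int) * (cnt v2 : Int) * p v v2)).sum
      + groupSum p cnt vs

-- ---- A-side: the nested index loops compute pairSum ----

lemma pyRange_natCast (n : Nat) : ∀ (a b : Nat), b - a = n →
    PySem.List.pyRange (a : Int) (b : Int) = (List.range n).map (fun k => ((a + k : Nat) : Int)) := by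
  induction n with
  | zero =>
    intro a b h
    rw [PySem.List.pyRange_one_eq_nil (by exact_mod_cast (by omega : b ≤ a))]
    simp
  | succ m ih =>
    intro a b h
    have hab : (a : Int) < (b : Int) := by exact_mod_cast (by omega : a < b)
    rw [PySem.List.pyRange_one_cons hab, List.range_succ_eq_map]
    have := ih (a + 1) b (by omega)
    push_cast at this ⊢
    rw [this]
    simp only [List.map_cons, List.map_map]
    refine List.cons_eq_cons.mpr ⟨by simp, ?_⟩
    apply List.map_congr_left; intro k _; simp [Function.comp]; ring

lemma getD_range_self {α : Type} (d : α) : ∀ (xs : List α),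
    xs = (List.range xs.length).map (fun j => xs.getD j d) := by
  intro xs
  induction xs with
  | nil => simp
  | cons x t ih =>
    rw [List.length_cons, List.range_succ_eq_map]
    simp only [List.map_cons, List.map_map]
    refine List.cons_eq_cons.mpr ⟨rfl, ?_⟩
    conv_lhs => rw [ih]
    apply List.map_congr_left
    intro j _
    simp

lemma drop_eq_map_range {α : Type} (d : α) : ∀ (a : Nat) (xs : List α),
    xs.drop a = (List.range (xs.length - a)).map (fun j => xs.getD (a + j) d) := by
  intro a
  induction a with
  | zero =>
    intro xs
    simpa using getD_range_self d xs
  | succ n ih =>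
    intro xs
    cases xs with
    | nil => simp
    | cons x t =>
      rw [List.drop_succ_cons, ih t]
      simp only [List.length_cons]
      have h1 : t.length + 1 - (n + 1) = t.length - n := by omega
      rw [h1]
      apply List.map_congr_left
      intro j _
      have h2 : n + 1 + j = (n + j) + 1 := by omega
      rw [h2]
      rfl

lemma sum_countP_eq_pairSum (q : Int → Bool) : ∀ (xs : List Int),
    ((List.range xs.length).map
      (fun i => (((xs.drop (i + 1)).countP (fun y => q (xs.getD i 0 + y)) : Nat) : Int))).sum
      = pairSum (fun x y => if q (x + y) then 1 else 0) xs := by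
  intro xs
  induction xs with
  | nil => simp [pairSum]
  | cons x t ih =>
    rw [List.length_cons, List.range_succ_eq_map]
    simp only [List.map_cons, List.map_map, List.sum_cons, pairSum]
    rw [PySem.List.sum_map_ite_one_zero (fun y => q (x + y)) t]
    congr 1

lemma solve_eq_pairSum (A : List Int) : solve A = pairSum (indf A) A := by
  unfold solve
  simp only []
  set hm : PySem.Dict Int Int := A.foldl (fun h i =>
      if h.contains i = false then h.insert i 1 else h.insert i (h.getD i 0 + 1))
      PySem.Dict.empty with hhm
  have hcongr := PySem.List.foldl_congr_mem A
      (fun (h : PySem.Dict Int Int) i => if h.contains i = false then h.insert i 1 else h.insert i (h.getD i 0 + 1))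
      (fun (h : PySem.Dict Int Int) i => h.insert i (if h.contains i = false then (1 : Int) else h.getD i 0 + 1))
      PySem.Dict.empty
      (fun h i _ => by by_cases hc : h.contains i = false <;> simp [hc])
  have hkeys : hm.keys = PySem.Set.ofList A := by
    rw [hhm, hcongr, PySem.Dict.keys_foldl_insert]
    rfl
  have hcont : ∀ s, hm.contains s = decide (s ∈ A) := by
    intro s
    rw [PySem.Dict.contains_eq_decide_mem_keys, hkeys]
    simp [PySem.Set.mem_ofList]
  rw [PySem.List.pyRange_zero_natCast, List.foldl_map]
  have hbody : ∀ (count : Int) (k : Nat), k ∈ List.range A.length →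
      ((PySem.List.pyRange ((k : Int) + 1) (A.length : Int)).foldl (fun count j =>
        if hm.contains (PySem.List.pyGetD A (k : Int) 0 + PySem.List.pyGetD A j 0) then count + 1 else count) count)
      = count + (((A.drop (k + 1)).countP (fun y => decide ((A.getD k 0 + y) ∈ A)) : Nat) : Int) := by
    intro count k _
    have hcast : ((k : Int) + 1) = ((k + 1 : Nat) : Int) := by push_cast; ring
    rw [hcast, pyRange_natCast (A.length - (k + 1)) (k + 1) A.length rfl, List.foldl_map,
      PySem.List.foldl_if_add_one (fun j => hm.contains (PySem.List.pyGetD A (k : Int) 0 + PySem.List.pyGetD A ((k + 1 + j : Nat) : Int) 0))]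
    congr 1
    rw [drop_eq_map_range 0 (k+1) A, List.countP_map]
    apply congrArg
    apply List.countP_congr
    intro j _
    simp only [Function.comp, PySem.List.pyGetD_natCast, hcont]
  rw [PySem.List.foldl_congr_mem (List.range A.length) _
    (fun (count : Int) k => count + (((A.drop (k + 1)).countP (fun y => decide ((A.getD k 0 + y) ∈ A)) : Nat) : Int)) 0
    hbody, PySem.List.foldl_add, zero_add, sum_countP_eq_pairSum (fun s => decide (s ∈ A)) A]
  unfold indf
  have hfun : (fun x y => if decide (x + y ∈ A) = true then (1 : Int) else 0)
      = fun x y => if x + y ∈ A then (1 : Int) else 0 := by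
    funext x y; simp
  rw [hfun]

-- ---- permutation invariance of pairSum for symmetric p ----

def allSum (p : Int → Int → Int) (xs : List Int) : Int :=
  (xs.map (fun x => (xs.map (p x)).sum)).sum
def diagSum (p : Int → Int → Int) (xs : List Int) : Int := (xs.map (fun x => p x x)).sum

lemma two_pairSum (p : Int → Int → Int) (hsym : ∀ x y, p x y = p y x) (xs : List Int) :
    2 * pairSum p xs = allSum p xs - diagSum p xs := by
  induction xs with
  | nil => simp [pairSum, allSum, diagSum]
  | cons x t ih =>
    simp only [pairSum, allSum, diagSum, List.map_cons, List.sum_cons] at *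
    rw [PySem.List.sum_map_add_int (f := fun a => p a x) (g := fun a => (t.map (p a)).sum)]
    have hx : (fun a => p a x) = p x := funext (fun a => hsym a x)
    rw [hx]
    omega

lemma pairSum_perm (p : Int → Int → Int) (hsym : ∀ x y, p x y = p y x)
    {xs ys : List Int} (h : xs.Perm ys) : pairSum p xs = pairSum p ys := by
  have hall : allSum p xs = allSum p ys := by
    unfold allSum
    have hfun : ∀ x, (xs.map (p x)).sum = (ys.map (p x)).sum := fun x => (h.map (p x)).sum_eq
    calc (xs.map (fun x => (xs.map (p x)).sum)).sum
        = (xs.map (fun x => (ys.map (p x)).sum)).sum := by simp only [hfun]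
      _ = (ys.map (fun x => (ys.map (p x)).sum)).sum := (h.map _).sum_eq
  have hdiag : diagSum p xs = diagSum p ys := (h.map _).sum_eq
  have h1 := two_pairSum p hsym xs
  have h2 := two_pairSum p hsym ys
  omega

-- ---- pairSum over the value groups is groupSum ----

lemma pairSum_append (p : Int → Int → Int) (xs ys : List Int) :
    pairSum p (xs ++ ys) = pairSum p xs + (xs.map (fun x => (ys.map (p x)).sum)).sum + pairSum p ys := by
  induction xs with
  | nil => simp [pairSum]
  | cons x t ih => simp [pairSum, ih]; ring

lemma pairSum_replicate (p : Int → Int → Int) (k : Nat) (v : Int) :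
    pairSum p (List.replicate k v) = (k.choose 2 : Int) * p v v := by
  induction k with
  | zero => simp [pairSum]
  | succ n ih =>
    rw [List.replicate_succ]
    simp [pairSum, ih, List.sum_replicate, Nat.choose_succ_succ, Nat.choose_one_right]
    ring

lemma sum_map_flatMap_replicate (p : Int → Int → Int) (cnt : Int → Nat) (x : Int) (vs : List Int) :
    ((vs.flatMap (fun v => List.replicate (cnt v) v)).map (p x)).sum
      = (vs.map (fun v => (cnt v : Int) * p x v)).sum := by
  induction vs with
  | nil => simp
  | cons v t ih => simp [ih, List.sum_replicate]

lemma pairSum_flatMap (p : Int → Int → Int) (cnt : Int → Nat) (vs : List Int) :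
    pairSum p (vs.flatMap (fun v => List.replicate (cnt v) v)) = groupSum p cnt vs := by
  induction vs with
  | nil => simp [pairSum, groupSum]
  | cons v t ih =>
    rw [List.flatMap_cons, pairSum_append, ih, pairSum_replicate]
    simp only [groupSum, List.map_replicate, List.sum_replicate,
      sum_map_flatMap_replicate, mul_assoc, List.sum_map_mul_left]
    simp

lemma count_flatMap_replicate (cnt : Int → Nat) (w : Int) :
    ∀ (vs : List Int), vs.Nodup →
      (vs.flatMap (fun v => List.replicate (cnt v) v)).count w = if w ∈ vs then cnt w else 0 := by
  intro vs hnd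
  induction vs with
  | nil => simp
  | cons v t ih =>
    simp only [List.nodup_cons] at hnd
    rw [List.flatMap_cons, List.count_append, List.count_replicate, ih hnd.2]
    by_cases hv : w = v
    · subst hv; simp [hnd.1]
    · simp [hv, Ne.symm hv]

lemma perm_flatMap_count (A : List Int) :
    A.Perm ((PySem.Set.ofList A).flatMap (fun v => List.replicate (A.count v) v)) := by
  rw [List.perm_iff_count]
  intro w
  rw [count_flatMap_replicate _ _ _ (PySem.Set.nodup_ofList A)]
  by_cases h : w ∈ A
  · simp [(PySem.Set.mem_ofList A w).mpr h]
  · have hn : ¬ w ∈ PySem.Set.ofList A := fun hc => h ((PySem.Set.mem_ofList A w).mp hc)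
    simp [hn, List.count_eq_zero_of_not_mem h]

-- ---- B-side: the loop over distinct values computes groupSum ----

lemma choose_two_cast (k : Nat) : (k.choose 2 : Int) = PySem.Int.floordiv ((k : Int) * ((k : Int) - 1)) 2 := by
  have h : ((k : Int) * ((k : Int) - 1)) = ((k * (k - 1) : Nat) : Int) := by
    cases k with
    | zero => simp
    | succ n => push_cast [Nat.succ_sub_one]; ring
  rw [h, Nat.choose_two_right]
  exact_mod_cast (PySem.Int.floordiv_natCast (k * (k - 1)) 2).symm

lemma solveAltLoop_eq (A : List Int) (vs : List Int) (total : Int) :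
    solveAltLoop (PySem.Dict.counter A) vs total
      = total + groupSum (indf A) (fun v => A.count v) vs := by
  induction vs generalizing total with
  | nil => simp [solveAltLoop, groupSum]
  | cons v t ih =>
    simp only [solveAltLoop]
    rw [PySem.List.foldl_congr_mem _ _
      (fun t2 v2 => t2 + if (PySem.Dict.counter A).contains (v + v2) then
          (PySem.Dict.counter A).getD v 0 * (PySem.Dict.counter A).getD v2 0 else 0) _
      (fun acc x _ => by by_cases h : (PySem.Dict.counter A).contains (v + x) <;> simp [h]),
      PySem.List.foldl_add, ih]
    simp only [groupSum, PySem.Dict.contains_counter, PySem.Dict.getD_counter]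
    have hterm : (if A.contains (v + v) then
        total + PySem.Int.floordiv ((A.count v : Int) * ((A.count v : Int) - 1)) 2 else total)
        = total + ((A.count v).choose 2 : Int) * indf A v v := by
      by_cases h : (v + v) ∈ A
      · simp [h, indf, choose_two_cast]
      · simp [h, indf]
    rw [hterm]
    have hmap : (t.map (fun v2 => if A.contains (v + v2) then (A.count v : Int) * (A.count v2 : Int) else 0))
        = t.map (fun v2 => (A.count v : Int) * (A.count v2 : Int) * indf A v v2) := by
      apply List.map_congr_left
      intro v2 _
      by_cases h : (v + v2) ∈ A
      · simp [h, indf]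
      · simp [h, indf]
    rw [hmap]
    ring

lemma solve_alt_eq_groupSum (A : List Int) :
    solve_alt A = groupSum (indf A) (fun v => A.count v) (PySem.Set.ofList A) := by
  unfold solve_alt
  simp only []
  rw [PySem.Dict.foldl_insert_getD_add_one_eq_counter, PySem.Dict.keys_counter,
    solveAltLoop_eq, zero_add]

-- ===== VERDICT (by name: the statement is the Claim_ definition above) =====
theorem solve_spec : Claim_equal_solve := by
  intro A _
  unfold Spec_solve
  rw [solve_eq_pairSum, solve_alt_eq_groupSum, ← pairSum_flatMap,
    pairSum_perm (indf A) (fun x y => by simp [indf, Int.add_comm]) (perm_flatMap_count A)]
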